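-- pv_equiv track=rewrite | github.com/betterzian/PrivacyGuard | privacyguard/infrastructure/pii/detector/models.py | negative_prev_covered_end_unit
-- ===== SOURCE A (Python) =====
-- from collections.abc import Sequence
--
-- def negative_prev_covered_end_unit(marks: Sequence[int], before_unit: int) -> int | None:
--     """返回左侧最近一个被 negative 覆盖 unit 的结束下标。"""
--     unit_count = len(marks)
--     if unit_count <= 0:
--         return None
--     end = max(0, min(unit_count, int(before_unit)))
--     for unit_index in range(end - 1, -1, -1):
--         if marks[unit_index] > 0:
--             return unit_index + 1
--     return None
-- ===== SOURCE B (Python) =====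
-- def negative_prev_covered_end_unit(marks, before_unit):
--     """Build the list of covered end indices in the prefix and take the last one."""
--     end = max(0, min(len(marks), int(before_unit)))
--     hits = [i + 1 for i, m in enumerate(marks[:end]) if m > 0]
--     return hits[-1] if hits else None
-- ===== Notes on version B (the rewrite author's own statement) =====
-- stated objective: alternative
-- what changed: Replaces the backward index scan with early return by staged passes: slice the prefix, enumerate it, filter positive marks into a list of candidate end indices, and return the last candidate (no index loop, no early exit).
import Mathlib
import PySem

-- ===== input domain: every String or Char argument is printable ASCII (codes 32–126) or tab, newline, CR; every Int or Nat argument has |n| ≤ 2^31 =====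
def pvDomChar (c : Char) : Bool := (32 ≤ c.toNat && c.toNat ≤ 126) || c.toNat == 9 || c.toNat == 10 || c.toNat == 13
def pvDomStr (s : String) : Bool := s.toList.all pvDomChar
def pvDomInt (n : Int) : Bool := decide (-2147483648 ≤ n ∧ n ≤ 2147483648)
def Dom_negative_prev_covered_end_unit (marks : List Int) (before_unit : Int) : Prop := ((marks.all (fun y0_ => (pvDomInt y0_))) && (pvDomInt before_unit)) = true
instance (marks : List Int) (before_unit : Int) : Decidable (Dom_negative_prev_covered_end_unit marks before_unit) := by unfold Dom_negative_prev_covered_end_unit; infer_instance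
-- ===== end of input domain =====

-- B replaces A's backward index scan with early return by staged passes (slice, enumerate, filter, map, last) — alternative decomposition, same cost.

-- ===== PORT A =====
-- backward scan: first index i in range(end-1, -1, -1) with marks[i] > 0 gives i+1
def negative_prev_covered_end_unit (marks : List Int) (before_unit : Int) : Option Int :=
  let unit_count : Int := marks.length
  if unit_count ≤ 0 then none
  else
    let e := max 0 (min unit_count before_unit)
    (PySem.List.pyRange (e - 1) (-1) (-1)).findSome? (fun i =>
      match PySem.List.pyGet? marks i with
      | some v => if v > 0 then some (i + 1) else none
      | none => none)   -- index always in range; IndexError branch unreachable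

-- ===== PORT B =====
-- hits = [i + 1 for i, m in enumerate(marks[:end]) if m > 0]; hits[-1] if hits else None
def negative_prev_covered_end_unit_alt (marks : List Int) (before_unit : Int) : Option Int :=
  let e := max 0 (min (marks.length : Int) before_unit)
  let hits := ((PySem.List.enumerate (PySem.List.slice marks (some 0) (some e))).filter
      (fun p => decide (p.2 > 0))).map (fun p => p.1 + 1)
  hits.getLast?   -- 'hits[-1] if hits else None' is exactly the last element as an Option

-- ===== PRECONDITION & SPEC =====
def Spec_negative_prev_covered_end_unit (marks : List Int) (before_unit : Int) (out : Option Int) : Prop := out = negative_prev_covered_end_unit_alt marks before_unit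
instance (marks : List Int) (before_unit : Int) (out : Option Int) : Decidable (Spec_negative_prev_covered_end_unit marks before_unit out) := by unfold Spec_negative_prev_covered_end_unit; infer_instance

-- ===== CLAIM (what is proved, stated in full; the proofs are below) =====
def Claim_equal_negative_prev_covered_end_unit : Prop := ∀ (marks : List Int) (before_unit : Int), Dom_negative_prev_covered_end_unit marks before_unit → Spec_negative_prev_covered_end_unit marks before_unit (negative_prev_covered_end_unit marks before_unit)

-- ===== LEMMAS AND PROOFS =====

-- filterMap with an if-some-else-none body is filter-then-map
theorem pv_filterMap_ite {α β : Type} (l : List α) (q : α → Bool) (g : α → β) :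
    l.filterMap (fun x => if q x then some (g x) else none) = (l.filter q).map g := by
  induction l with
  | nil => rfl
  | cons a t ih => by_cases hq : q a <;> simp [hq, ih]

-- findSome? only depends on the function's values on members
theorem pv_findSome?_congr {α β : Type} (f g : α → Option β) :
    ∀ (l : List α), (∀ x ∈ l, f x = g x) → l.findSome? f = l.findSome? g := by
  intro l
  induction l with
  | nil => intro _; rfl
  | cons a t ih =>
    intro h
    simp only [List.findSome?, h a (List.mem_cons_self)]
    cases g a with
    | some v => rfl
    | none => exact ih (fun x hx => h x (List.mem_cons_of_mem a hx))

-- each pair of enumerate at start 0 is (k, l[k]) for a natural k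
theorem pv_mem_enumerate_getElem? {α : Type} :
    ∀ (l : List α) (s : Int) (p : Int × α), p ∈ PySem.List.enumerate l s →
      ∃ k : Nat, p.1 = s + (k : Int) ∧ l[k]? = some p.2 := by
  intro l
  induction l with
  | nil => intro s p hp; simp [PySem.List.enumerate_nil] at hp
  | cons a t ih =>
    intro s p hp
    rw [PySem.List.enumerate_cons] at hp
    rcases List.mem_cons.mp hp with h | h
    · exact ⟨0, by simp [h]⟩
    · obtain ⟨k, hk1, hk2⟩ := ih (s + 1) p h
      exact ⟨k + 1, by push_cast; omega, by simpa using hk2⟩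

-- ===== VERDICT (by name: the statement is the Claim_ definition above) =====
theorem negative_prev_covered_end_unit_spec : Claim_equal_negative_prev_covered_end_unit := by
  intro marks before_unit _
  unfold Spec_negative_prev_covered_end_unit
  unfold negative_prev_covered_end_unit negative_prev_covered_end_unit_alt
  simp only []
  set e : Int := max 0 (min (marks.length : Int) before_unit) with he
  have he0 : 0 ≤ e := le_max_left _ _
  have helen : e ≤ (marks.length : Int) := by
    simp only [he]
    omega
  -- B's slice is the prefix
  have hslice : PySem.List.slice marks (some 0) (some e) = marks.take e.toNat := by
    rw [PySem.List.slice_zero_start, PySem.List.slice_to _ he0]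
  by_cases hnil : (marks.length : Int) ≤ 0
  · -- marks is empty: A returns none; B's prefix is empty
    have : marks = [] := by
      cases marks with
      | nil => rfl
      | cons a t => exfalso; simp at hnil; omega
    subst this
    simp [hslice, PySem.List.enumerate_nil]
  · simp only [if_neg hnil, hslice]
    set prefixL := marks.take e.toNat with hpre
    have hlenpre : (prefixL.length : Int) = e := by
      simp [hpre]
      omega
    -- A's countdown range is the reverse of the forward range, i.e. of enumerate's indices
    rw [show (PySem.List.pyRange (e - 1) (-1) (-1)) = (PySem.List.pyRange 0 e 1).reverse by
          simpa using PySem.List.pyRange_neg_one_eq_reverse (a := e - 1) (b := -1)]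
    rw [show PySem.List.pyRange 0 e 1 = (PySem.List.enumerate prefixL 0).map (·.1) by
          rw [PySem.List.map_fst_enumerate]; simp [hlenpre]]
    rw [← List.map_reverse, List.findSome?_map]
    have hcongr : ((PySem.List.enumerate prefixL 0).reverse.findSome?
        ((fun i => match PySem.List.pyGet? marks i with
          | some v => if v > 0 then some (i + 1) else none
          | none => none) ∘ (·.1)))
        = (PySem.List.enumerate prefixL 0).reverse.findSome?
            (fun p => if decide (p.2 > 0) then some (p.1 + 1) else none) := by
      apply pv_findSome?_congr
      intro p hp
      rw [List.mem_reverse] at hp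
      obtain ⟨k, hk1, hk2⟩ := pv_mem_enumerate_getElem? prefixL 0 p hp
      have hklt : k < prefixL.length := by
        by_contra h
        rw [List.getElem?_eq_none (by omega)] at hk2
        simp at hk2
      have hke : k < e.toNat := by
        have h2 := hklt
        simp only [hpre, List.length_take] at h2
        omega
      have hkm : marks[k]? = some p.2 := by
        rw [List.getElem?_take_of_lt hke] at hk2
        exact hk2
      have hget : PySem.List.pyGet? marks p.1 = some p.2 := by
        rw [hk1]
        simpa [PySem.List.pyGet?_natCast] using hkm
      simp only [Function.comp, hget]
      by_cases hv : p.2 > 0 <;> simp [hv]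
    rw [hcongr, ← List.head?_filterMap, pv_filterMap_ite, List.filter_reverse, List.map_reverse,
        ← List.getLast?_eq_head?_reverse]
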